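-- pv_equiv track=rewrite | github.com/PrimeIdeal/qr-encoder | encode/common.py | select_encoding
-- ===== SOURCE A (Python) =====
-- def select_encoding(msg: str) -> str:
--     """
--     Determines which type of text encoding will be used for the message.
--
--     If msg is strictly decimal, specifies numeric encoding. If msg is composed
--     of numbers, uppercase letters, and characters in
--     (' ', '$', '%', '*', '+', '-', '.', '/', ':'), specifies alphanumeric
--     encoding. Otherwise, specifies byte encoding.
--
--     Parameters
--     ----------
--     msg : str
--         Text to be encoded as a QR code.
--
--     Returns
--     -------
--     str
--         Specified encoding mode.
--
--     Raises
--     ------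
--     ValueError
--         Input is too long to be encoded.
--     """
--     if len(msg) > 7089:
--         raise ValueError('Input exceeds maximum encoding length.')
--
--     if msg.isdecimal():
--         return 'numeric'
--
--     for char in msg:
--         if (char.isalpha() and char.islower()) or \
--             (not char.isalpha() and not char.isdecimal()
--              and char not in ALPHANUMERIC_CHARS):
--             return 'byte'
--
--     return 'alphanumeric'
--
-- ALPHANUMERIC_CHARS = {' ', '$', '%', '*', '+', '-', '.', '/', ':'}
-- ===== SOURCE B (Python) =====
-- ALPHANUMERIC_CHARS = {' ', '$', '%', '*', '+', '-', '.', '/', ':'}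
--
--
-- def _rank(char):
--     """0 = numeric-only, 1 = needs alphanumeric, 2 = needs byte encoding."""
--     if (char.isalpha() and char.islower()) or \
--             (not char.isalpha() and not char.isdecimal()
--              and char not in ALPHANUMERIC_CHARS):
--         return 2
--     if char.isdecimal():
--         return 0
--     return 1
--
--
-- def select_encoding(msg: str) -> str:
--     if len(msg) > 7089:
--         raise ValueError('Input exceeds maximum encoding length.')
--     if not msg:
--         return 'alphanumeric'
--     return ('numeric', 'alphanumeric', 'byte')[max(map(_rank, msg))]
-- ===== Notes on version B (the rewrite author's own statement) =====
-- stated objective: alternative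
-- what changed: B classifies each character once into a numeric rank (0=numeric, 1=alphanumeric, 2=byte) and returns the mode indexed by the maximum rank of a single pass, instead of A's whole-string isdecimal() test followed by a separate early-exit scan for byte characters.
import Mathlib
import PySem

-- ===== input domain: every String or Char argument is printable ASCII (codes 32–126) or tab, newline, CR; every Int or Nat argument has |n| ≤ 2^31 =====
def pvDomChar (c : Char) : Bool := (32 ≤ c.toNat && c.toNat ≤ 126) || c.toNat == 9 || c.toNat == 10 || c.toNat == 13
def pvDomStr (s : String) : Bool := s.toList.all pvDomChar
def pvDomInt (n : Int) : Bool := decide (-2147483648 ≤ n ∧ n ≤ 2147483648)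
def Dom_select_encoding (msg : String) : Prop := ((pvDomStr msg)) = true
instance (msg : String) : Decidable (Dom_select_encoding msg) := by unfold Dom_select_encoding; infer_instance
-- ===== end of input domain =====

-- B replaces A's isdecimal()-test-plus-byte-scan by one per-character rank (0/1/2) whose
-- maximum indexes the mode; equivalence of the return values is proved on inputs A does
-- not raise on (len ≤ 7089).  Python's isdecimal() is ported as PySem isdigit: exact on
-- the printable-ASCII domain Dom_select_encoding.

-- ===== PORT A =====
-- ALPHANUMERIC_CHARS = {' ', '$', '%', '*', '+', '-', '.', '/', ':'} — only membership is used
def pvAlnumCharsA : List Char := [' ', '$', '%', '*', '+', '-', '.', '/', ':']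

-- the byte-trigger condition of A's loop body, verbatim
def pvByteCondA (c : Char) : Bool :=
  (PySem.Chars.isalpha c && PySem.Chars.islower c) ||
  (!PySem.Chars.isalpha c && !PySem.Chars.isdigit c && !(pvAlnumCharsA.contains c))

-- A's for-loop with early return
def pvLoopA : List Char → String
  | [] => "alphanumeric"
  | c :: rest => if pvByteCondA c then "byte" else pvLoopA rest

def select_encoding (msg : String) : String :=
  if PySem.Str.strIsdigit msg then "numeric" else pvLoopA msg.toList

-- ===== PORT B =====
def pvAlnumCharsB : List Char := [' ', '$', '%', '*', '+', '-', '.', '/', ':']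

-- _rank from Source B
def pvRankB (c : Char) : Nat :=
  if (PySem.Chars.isalpha c && PySem.Chars.islower c) ||
     (!PySem.Chars.isalpha c && !PySem.Chars.isdigit c && !(pvAlnumCharsB.contains c)) then 2
  else if PySem.Chars.isdigit c then 0
  else 1

def select_encoding_alt (msg : String) : String :=
  if msg.toList.isEmpty then "alphanumeric"
  else
    match PySem.List.max? (msg.toList.map pvRankB) id with
    | none => "alphanumeric"  -- unreachable totalization guard: the list is nonempty here
    | some m => ["numeric", "alphanumeric", "byte"].getD m ""

-- ===== PRECONDITION & SPEC =====
-- A raises ValueError on strings longer than 7089 characters; Pre_ excludes exactly those.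
def Pre_select_encoding (msg : String) : Prop := msg.toList.length ≤ 7089
instance (msg : String) : Decidable (Pre_select_encoding msg) := by unfold Pre_select_encoding; infer_instance
def pvWitness_select_encoding : String := "HELLO 123"

def Spec_select_encoding (msg : String) (out : String) : Prop := out = select_encoding_alt msg
instance (msg : String) (out : String) : Decidable (Spec_select_encoding msg out) := by unfold Spec_select_encoding; infer_instance

-- ===== CLAIM (what is proved, stated in full; the proofs are below) =====
def Claim_equal_select_encoding : Prop := ∀ (msg : String), Dom_select_encoding msg → Pre_select_encoding msg → Spec_select_encoding msg (select_encoding msg)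

-- ===== LEMMAS AND PROOFS =====

-- rank 2 exactly on byte-trigger characters
theorem pvRank_two_iff (c : Char) : pvRankB c = 2 ↔ pvByteCondA c = true := by
  unfold pvRankB
  rw [show ((PySem.Chars.isalpha c && PySem.Chars.islower c) ||
    (!PySem.Chars.isalpha c && !PySem.Chars.isdigit c && !(pvAlnumCharsB.contains c))) = pvByteCondA c from rfl]
  by_cases h : pvByteCondA c = true
  · simp [h]
  · simp only [Bool.not_eq_true] at h
    simp only [h, Bool.false_eq_true, if_false]
    constructor
    · intro hh; split_ifs at hh; omega
    · intro hh; exact absurd hh (by simp)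

-- a decimal digit never triggers byte encoding
theorem pvDigit_not_byte (c : Char) (h : PySem.Chars.isdigit c = true) : pvByteCondA c = false := by
  have hl : PySem.Chars.islower c = false := by
    by_contra hh
    simp only [Bool.not_eq_false] at hh
    unfold PySem.Chars.islower at hh
    unfold PySem.Chars.isdigit at h
    simp only [Char.le_def, UInt32.le_iff_toNat_le, Bool.and_eq_true, decide_eq_true_eq] at hh h
    have h9 : ('9' : Char).val.toNat = 57 := rfl
    have ha : ('a' : Char).val.toNat = 97 := rfl
    omega
  unfold pvByteCondA
  rw [h, hl]
  simp

theorem pvRank_zero_iff (c : Char) : pvRankB c = 0 ↔ PySem.Chars.isdigit c = true := by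
  constructor
  · intro h
    unfold pvRankB at h
    split_ifs at h with h1 h2
    · exact h2
  · intro h
    unfold pvRankB
    rw [show ((PySem.Chars.isalpha c && PySem.Chars.islower c) ||
      (!PySem.Chars.isalpha c && !PySem.Chars.isdigit c && !(pvAlnumCharsB.contains c))) = pvByteCondA c from rfl,
      pvDigit_not_byte c h]
    simp [h]

theorem pvRank_le_two (c : Char) : pvRankB c ≤ 2 := by
  unfold pvRankB; split_ifs <;> omega

-- A's loop returns "byte" iff some character triggers it
theorem pvLoopA_eq (l : List Char) :
    pvLoopA l = if l.any pvByteCondA then "byte" else "alphanumeric" := by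
  induction l with
  | nil => simp [pvLoopA]
  | cons c rest ih =>
    by_cases h : pvByteCondA c = true
    · simp [pvLoopA, h]
    · simp only [Bool.not_eq_true] at h
      simp [pvLoopA, h, ih]

-- PySem.List.max? over a nonempty Nat list yields its maximum
theorem pvMaxAux (l : List Nat) : ∀ y : Nat, ∃ m, PySem.List.max? (y :: l) (id : Nat → Nat) = some m ∧
    (m = y ∨ m ∈ l) ∧ y ≤ m ∧ ∀ x ∈ l, x ≤ m := by
  induction l with
  | nil => exact fun y => ⟨y, rfl, Or.inl rfl, le_refl y, by simp⟩
  | cons z rest ih =>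
    intro y
    have key : PySem.List.max? (y :: z :: rest) (id : Nat → Nat) =
        PySem.List.max? ((if y < z then z else y) :: rest) id := by
      by_cases h : y < z <;> simp [PySem.List.max?, List.foldl, h]
    obtain ⟨m, hm, hmem, hle, hall⟩ := ih (if y < z then z else y)
    refine ⟨m, key ▸ hm, ?_, ?_, ?_⟩
    · rcases hmem with h1 | h1
      · by_cases h : y < z
        · rw [if_pos h] at h1; exact Or.inr (by simp [h1])
        · rw [if_neg h] at h1; exact Or.inl h1
      · exact Or.inr (by simp [h1])
    · split_ifs at hle with h <;> omega
    · intro x hx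
      rcases List.mem_cons.mp hx with h1 | h1
      · subst h1; split_ifs at hle with h <;> omega
      · exact hall x h1

theorem pvMax?_spec (l : List Nat) (hne : l ≠ []) :
    ∃ m, PySem.List.max? l id = some m ∧ m ∈ l ∧ ∀ x ∈ l, x ≤ m := by
  cases l with
  | nil => exact absurd rfl hne
  | cons y rest =>
    obtain ⟨m, hm, hmem, hle, hall⟩ := pvMaxAux rest y
    refine ⟨m, hm, ?_, ?_⟩
    · rcases hmem with h | h <;> simp [h]
    · intro x hx
      rcases List.mem_cons.mp hx with h | h
      · omega
      · exact hall x h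

-- main equivalence on the character list
theorem pv_main (l : List Char) :
    (if PySem.Chars.strIsdigit l then "numeric" else pvLoopA l) =
    (if l.isEmpty then "alphanumeric"
     else match PySem.List.max? (l.map pvRankB) id with
       | none => "alphanumeric"
       | some m => ["numeric", "alphanumeric", "byte"].getD m "") := by
  by_cases hne : l = []
  · subst hne; simp [PySem.Chars.strIsdigit, pvLoopA]
  · have hmapne : l.map pvRankB ≠ [] := by simpa using hne
    obtain ⟨m, hm, hmem, hall⟩ := pvMax?_spec (l.map pvRankB) hmapne
    obtain ⟨c, hc, hrc⟩ := List.mem_map.mp hmem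
    rw [pvLoopA_eq, if_neg (show ¬ l.isEmpty = true by simp [hne]), hm]
    by_cases hbyte : l.any pvByteCondA = true
    · -- some byte-trigger character: the maximum rank is 2
      obtain ⟨b, hb, hbc⟩ := List.any_eq_true.mp hbyte
      have hm2 : m = 2 := by
        have h1 := hall (pvRankB b) (List.mem_map.mpr ⟨b, hb, rfl⟩)
        have h2 := (pvRank_two_iff b).mpr hbc
        have h3 : m ≤ 2 := hrc ▸ pvRank_le_two c
        omega
      have hbd : PySem.Chars.isdigit b = false := by
        by_contra h
        simp only [Bool.not_eq_false] at h
        exact absurd hbc (by simp [pvDigit_not_byte b h])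
      have hdig : PySem.Chars.strIsdigit l = false := by
        have : l.all PySem.Chars.isdigit = false := by
          rw [List.all_eq_false]
          exact ⟨b, hb, by simp [hbd]⟩
        simp [PySem.Chars.strIsdigit, this]
      rw [if_neg (by simp [hdig]), if_pos hbyte, hm2]
      rfl
    · have hnb : ∀ x ∈ l, pvByteCondA x = false := by
        intro x hx
        by_contra h
        simp only [Bool.not_eq_false] at h
        exact hbyte (List.any_eq_true.mpr ⟨x, hx, h⟩)
      have hm1 : m ≤ 1 := by
        have h3 : m ≤ 2 := hrc ▸ pvRank_le_two c
        have hc2 : pvRankB c ≠ 2 := fun h => by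
          have := (pvRank_two_iff c).mp h
          rw [hnb c hc] at this
          exact Bool.false_ne_true this
        omega
      rw [if_neg hbyte]
      by_cases hdig : PySem.Chars.strIsdigit l = true
      · have hm0 : m = 0 := by
          unfold PySem.Chars.strIsdigit at hdig
          simp only [Bool.and_eq_true, List.all_eq_true] at hdig
          have := (pvRank_zero_iff c).mpr (hdig.2 c hc)
          omega
        rw [if_pos hdig, hm0]
        rfl
      · have hm0 : m ≠ 0 := by
          intro h0
          apply hdig
          unfold PySem.Chars.strIsdigit
          have hall0 : ∀ x ∈ l, PySem.Chars.isdigit x = true := by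
            intro x hx
            have := hall (pvRankB x) (List.mem_map.mpr ⟨x, hx, rfl⟩)
            exact (pvRank_zero_iff x).mp (by omega)
          simp [List.all_eq_true.mpr hall0, hne]
        have hm1' : m = 1 := by omega
        rw [if_neg hdig, hm1']
        rfl

-- ===== VERDICT (by name: the statement is the Claim_ definition above) =====
theorem select_encoding_spec : Claim_equal_select_encoding := by
  intro msg _ _
  unfold Spec_select_encoding select_encoding select_encoding_alt
  rw [show PySem.Str.strIsdigit msg = PySem.Chars.strIsdigit msg.toList from rfl]
  exact pv_main msg.toList
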